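-- pv_equiv track=rewrite | github.com/Fondamenti18/fondamenti-di-programmazione | students/1815836/homework04/program01.py | find_ancients
-- ===== SOURCE A (Python) =====
-- def find_ancients(diz,diz_root,root,y,grado):
--     if root==[]:return (diz_root)
--     diz_value=diz.get(root)
--     diz_root[root]=grado
--     if(len(diz_value)==y):
--         grado+=1
--     for val in diz_value:
--         root=val
--         diz_root.update(find_ancients(diz,diz_root,root,y,grado))
--     return(diz_root)
-- ===== SOURCE B (Python) =====
-- def find_ancients(diz, diz_root, root, y, grado):
--     stack = [(root, grado)]
--     while stack:
--         node, g = stack.pop()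
--         children = diz.get(node)
--         diz_root[node] = g
--         if len(children) == y:
--             g += 1
--         for child in reversed(children):
--             stack.append((child, g))
--     return diz_root
-- ===== Notes on version B (the rewrite author's own statement) =====
-- stated objective: faster
-- what changed: Replaces the recursion that calls dict.update with the whole accumulated diz_root after every child (an O(|diz_root|) no-op per edge) by an explicit stack loop doing one dict write per node in the same pre-order.
import Mathlib
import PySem

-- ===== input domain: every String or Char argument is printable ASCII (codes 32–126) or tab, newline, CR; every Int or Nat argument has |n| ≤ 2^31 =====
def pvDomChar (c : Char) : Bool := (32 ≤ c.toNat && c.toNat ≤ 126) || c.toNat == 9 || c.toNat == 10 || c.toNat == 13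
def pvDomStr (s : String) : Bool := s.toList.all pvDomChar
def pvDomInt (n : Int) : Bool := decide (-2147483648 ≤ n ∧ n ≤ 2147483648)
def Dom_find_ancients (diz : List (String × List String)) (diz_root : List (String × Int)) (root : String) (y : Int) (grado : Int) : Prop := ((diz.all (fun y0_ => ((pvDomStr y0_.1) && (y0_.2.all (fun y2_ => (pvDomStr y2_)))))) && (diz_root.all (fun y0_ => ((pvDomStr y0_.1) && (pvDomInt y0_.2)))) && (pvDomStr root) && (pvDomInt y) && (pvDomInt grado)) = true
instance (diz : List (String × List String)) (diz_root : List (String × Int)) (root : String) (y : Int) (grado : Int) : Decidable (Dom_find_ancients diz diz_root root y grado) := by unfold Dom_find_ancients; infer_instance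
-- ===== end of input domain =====

-- B replaces A's recursion (which re-inserts the whole accumulated dict via `diz_root.update(...)`
-- after every child) by an explicit stack loop that visits the same nodes in the same pre-order
-- and performs one dict write per node.  A mutates `diz_root` in place and returns it; B performs
-- the same mutation, and the equivalence proved here is about the return value.

-- ===== PORT A =====
-- A's recursion, step for step.  `if root==[]` is always False (root is a string) and is not
-- portable to the String type.  The fuel argument (diz.length + 1 at the top level, one unit per
-- recursive call) is only a totality guard: inside Pre_ the recursion depth is bounded by the
-- number of keys of diz, so it never runs out there.  On a node missing from diz Python raises
-- TypeError (len(None)); the port returns the accumulator there — excluded by Pre_.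
def pvGoA (diz : List (String × List String)) (y : Int) :
    Nat → String → Int → PySem.Dict String Int → PySem.Dict String Int
  | 0, _, _, acc => acc
  | f + 1, root, grado, acc =>
    match (PySem.Dict.mk diz).get? root with
    | none => acc
    | some cs =>
      let acc1 := acc.insert root grado                    -- diz_root[root] = grado
      let g := if (List.length cs : Int) = y then grado + 1 else grado
      -- for val in diz_value: diz_root.update(find_ancients(diz, diz_root, val, y, grado))
      cs.foldl (fun a c => PySem.Dict.update a (pvGoA diz y f c g a).items) acc1
termination_by f => f

def find_ancients (diz : List (String × List String)) (diz_root : List (String × Int)) (root : String) (y : Int) (grado : Int) : List (String × Int) :=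
  (pvGoA diz y (diz.length + 1) root grado (PySem.Dict.mk diz_root)).items

-- ===== PORT B =====
-- helpers for pvGoB's termination measure (a totality guard, not part of the algorithm)
def pvCmax (diz : List (String × List String)) : Nat :=
  diz.foldl (fun m p => max m p.2.length) 0

def pvW (C : Nat) (st : List (String × Int × Nat)) : Nat :=
  (st.map (fun e => (C + 1) ^ e.2.2)).sum

theorem pv_get?_mem_values {diz : List (String × List String)} {k : String} {cs : List String}
    (h : (PySem.Dict.mk diz).get? k = some cs) : cs ∈ diz.map Prod.snd := by
  induction diz with
  | nil => simp [PySem.Dict.get?] at h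
  | cons p rest ih =>
    rw [show (PySem.Dict.mk (p :: rest)) = PySem.Dict.mk ((p.1, p.2) :: rest) by rfl] at h
    rw [PySem.Dict.get?_mk_cons] at h
    by_cases hk : p.1 == k
    · simp [hk] at h; simp [← h]
    · simp [hk] at h; simp [ih h]

theorem pv_len_le_pvCmax {diz : List (String × List String)} {k : String} {cs : List String}
    (h : (PySem.Dict.mk diz).get? k = some cs) : cs.length ≤ pvCmax diz := by
  have hm := pv_get?_mem_values h
  unfold pvCmax
  have H : ∀ (l : List (String × List String)) (m : Nat), (cs ∈ l.map Prod.snd → cs.length ≤ l.foldl (fun m p => max m p.2.length) m) ∧ m ≤ l.foldl (fun m p => max m p.2.length) m := by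
    intro l
    induction l with
    | nil => simp
    | cons q rest ih =>
      intro m
      refine ⟨?_, le_trans (le_max_left m q.2.length) (ih _).2⟩
      intro hmem
      simp only [List.map_cons, List.mem_cons] at hmem
      rcases hmem with h1 | h2
      · subst h1; exact le_trans (le_max_right m _) (ih _).2
      · exact (ih _).1 h2
  exact (H diz 0).1 hm

-- Python keeps the stack top at the END of the list (`pop()` / pushing `reversed(children)`);
-- the port keeps the top at the HEAD of the list, so that push becomes `cs.map … ++ rest` —
-- the same stack and the same visitation order.  Each entry carries its fuel (a totality
-- guard mirroring its depth, never exhausted inside Pre_; missing node = Python's TypeError).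
def pvGoB (diz : List (String × List String)) (y : Int) :
    List (String × Int × Nat) → PySem.Dict String Int → PySem.Dict String Int
  | [], acc => acc
  | (node, g, f) :: rest, acc =>
    match f with
    | 0 => pvGoB diz y rest acc
    | f' + 1 =>
      match hg : (PySem.Dict.mk diz).get? node with
      | none => pvGoB diz y rest acc
      | some cs =>
        let acc1 := acc.insert node g                      -- diz_root[node] = g
        let g' := if (List.length cs : Int) = y then g + 1 else g
        pvGoB diz y (cs.map (fun c => (c, g', f')) ++ rest) acc1
termination_by st => pvW (pvCmax diz) st
decreasing_by
  · simp [pvW]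
  · simp [pvW]
  · simp only [pvW, List.map_append, List.sum_append, List.map_map, List.map_cons, List.sum_cons]
    have hlen : cs.length ≤ pvCmax diz := pv_len_le_pvCmax hg
    set C := pvCmax diz
    have hmap : ((cs.map ((fun (e : String × Int × Nat) => (C + 1) ^ e.2.2) ∘ fun c => (c, g', f'))).sum)
        = cs.length * (C + 1) ^ f' := by
      simp [Function.comp_def, List.map_const', List.sum_replicate, smul_eq_mul]
    rw [hmap]
    have hP : 1 ≤ (C + 1) ^ f' := Nat.one_le_pow _ _ (Nat.succ_pos _)
    have h1 : cs.length * (C + 1) ^ f' ≤ C * (C + 1) ^ f' := Nat.mul_le_mul_right _ hlen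
    have h2 : (C + 1) ^ (f' + 1) = C * (C + 1) ^ f' + (C + 1) ^ f' := by
      rw [pow_succ]; ring
    simp only [Nat.succ_eq_add_one, h2]
    omega

def find_ancients_alt (diz : List (String × List String)) (diz_root : List (String × Int)) (root : String) (y : Int) (grado : Int) : List (String × Int) :=
  (pvGoB diz y [(root, grado, diz.length + 1)] (PySem.Dict.mk diz_root)).items

-- ===== PRECONDITION & SPEC =====
-- the set of nodes reachable from `start` in diz, by diz.length+1 rounds of successor closure
def pvReach (diz : List (String × List String)) (start : List String) : List String :=
  (fun S => PySem.Set.update S (S.flatMap (fun k => (PySem.Dict.mk diz).getD k [])))^[diz.length + 1] (PySem.Set.ofList start)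

-- Pre_ excludes exactly the inputs on which the Python A does not return: a node reachable from
-- root but missing from diz makes A raise TypeError (len(None)), and a reachable cycle makes the
-- recursion diverge (RecursionError); the two Nodup conjuncts merely restate that diz and
-- diz_root are Python dicts (unique keys), true of every dict-shaped input.
def Pre_find_ancients (diz : List (String × List String)) (diz_root : List (String × Int)) (root : String) (y : Int) (grado : Int) : Prop :=
  (diz.map Prod.fst).Nodup ∧ (diz_root.map Prod.fst).Nodup ∧
  (∀ k ∈ pvReach diz [root], k ∈ diz.map Prod.fst) ∧
  (∀ k ∈ pvReach diz [root], k ∉ pvReach diz ((PySem.Dict.mk diz).getD k []))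
instance (diz : List (String × List String)) (diz_root : List (String × Int)) (root : String) (y : Int) (grado : Int) : Decidable (Pre_find_ancients diz diz_root root y grado) := by unfold Pre_find_ancients; infer_instance

def pvWitness_find_ancients : (List (String × List String)) × (List (String × Int)) × String × Int × Int :=
  ([("a", ["b", "b"]), ("b", [])], [("c", 7)], "a", 2, 0)

def Spec_find_ancients (diz : List (String × List String)) (diz_root : List (String × Int)) (root : String) (y : Int) (grado : Int) (out : List (String × Int)) : Prop := out = find_ancients_alt diz diz_root root y grado
instance (diz : List (String × List String)) (diz_root : List (String × Int)) (root : String) (y : Int) (grado : Int) (out : List (String × Int)) : Decidable (Spec_find_ancients diz diz_root root y grado out) := by unfold Spec_find_ancients; infer_instance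

-- ===== CLAIM (what is proved, stated in full; the proofs are below) =====
def Claim_equal_find_ancients : Prop := ∀ (diz : List (String × List String)) (diz_root : List (String × Int)) (root : String) (y : Int) (grado : Int), Dom_find_ancients diz diz_root root y grado → Pre_find_ancients diz diz_root root y grado → Spec_find_ancients diz diz_root root y grado (find_ancients diz diz_root root y grado)

-- ===== LEMMAS AND PROOFS =====

-- A's recursion with the no-op `diz_root.update(result)` collapsed away (proof helper only)
def pvGoAc (diz : List (String × List String)) (y : Int) :
    Nat → String → Int → PySem.Dict String Int → PySem.Dict String Int
  | 0, _, _, acc => acc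
  | f + 1, root, grado, acc =>
    match (PySem.Dict.mk diz).get? root with
    | none => acc
    | some cs =>
      let acc1 := acc.insert root grado
      let g := if (List.length cs : Int) = y then grado + 1 else grado
      cs.foldl (fun a c => pvGoAc diz y f c g a) acc1
termination_by f => f

-- insert with a fresh head key distributes over the head
theorem pv_insert_cons {k : String} {w : Int} {ds : List (String × Int)} {a : String} {b : Int}
    (h : k ≠ a) :
    (PySem.Dict.mk ((k, w) :: ds)).insert a b = PySem.Dict.mk ((k, w) :: ((PySem.Dict.mk ds).insert a b).items) := by
  apply PySem.Dict.ext
  by_cases hc : (PySem.Dict.mk ds).contains a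
  · have hc2 : (PySem.Dict.mk ((k, w) :: ds)).contains a = true := by
      rw [PySem.Dict.contains_mk] at hc ⊢
      simp [hc]
    rw [PySem.Dict.items_insert_of_contains _ _ hc2]
    show _ = (k, w) :: ((PySem.Dict.mk ds).insert a b).items
    rw [PySem.Dict.items_insert_of_contains _ _ hc]
    simp [beq_iff_eq, h]
  · have hcf : (PySem.Dict.mk ds).contains a = false := by
      revert hc; cases hb : (PySem.Dict.mk ds).contains a <;> simp
    have hc2 : (PySem.Dict.mk ((k, w) :: ds)).contains a = false := by
      rw [PySem.Dict.contains_mk] at hcf ⊢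
      simp only [List.any_cons, hcf, Bool.or_false]
      simp [h]
    rw [PySem.Dict.items_insert_of_not_contains _ _ hc2]
    show _ = (k, w) :: ((PySem.Dict.mk ds).insert a b).items
    rw [PySem.Dict.items_insert_of_not_contains _ _ hcf]
    rfl

-- folding inserts of fresh keys past an untouched head
theorem pv_foldl_insert_cons {rs : List (String × Int)} {k : String} {w : Int}
    (ds : List (String × Int)) (h : k ∉ rs.map Prod.fst) :
    rs.foldl (fun d p => d.insert p.1 p.2) (PySem.Dict.mk ((k, w) :: ds))
      = PySem.Dict.mk ((k, w) :: (rs.foldl (fun d p => d.insert p.1 p.2) (PySem.Dict.mk ds)).items) := by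
  induction rs generalizing ds with
  | nil => rfl
  | cons p rs ih =>
    simp only [List.map_cons, List.mem_cons, not_or] at h
    simp only [List.foldl_cons]
    rw [pv_insert_cons h.1]
    have := ih (ds := ((PySem.Dict.mk ds).insert p.1 p.2).items) h.2
    simpa using this

-- d.update(r) = r whenever r arose from d by in-place overwrites and appends
theorem pv_update_extends_aux :
    ∀ (ds rs : List (String × Int)), (rs.map Prod.fst).Nodup → (ds.map Prod.fst <+: rs.map Prod.fst) →
      rs.foldl (fun d p => d.insert p.1 p.2) (PySem.Dict.mk ds) = PySem.Dict.mk rs := by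
  intro ds
  induction ds with
  | nil =>
    intro rs hn _
    apply PySem.Dict.ext
    have := PySem.Dict.items_foldl_insert_fresh rs Prod.fst Prod.snd (PySem.Dict.mk ([] : List (String × Int)))
      (by intro p _; rw [PySem.Dict.contains_mk]; simp) hn
    simpa using this
  | cons q ds ih =>
    intro rs hn hpre
    cases rs with
    | nil => simp at hpre
    | cons r0 rs =>
      simp only [List.map_cons] at hn hpre
      have hk : q.1 = r0.1 := (List.cons_prefix_cons.1 hpre).1
      have hpre' : ds.map Prod.fst <+: rs.map Prod.fst := (List.cons_prefix_cons.1 hpre).2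
      have hk_not_rs : r0.1 ∉ rs.map Prod.fst := (List.nodup_cons.1 hn).1
      have hn' : (rs.map Prod.fst).Nodup := (List.nodup_cons.1 hn).2
      have hk_not_ds : q.1 ∉ ds.map Prod.fst := by
        intro hmem
        exact hk_not_rs (hpre'.sublist.mem (hk ▸ hmem))
      simp only [List.foldl_cons]
      have hins : (PySem.Dict.mk (q :: ds)).insert r0.1 r0.2 = PySem.Dict.mk ((r0.1, r0.2) :: ds) := by
        apply PySem.Dict.ext
        have hc : (PySem.Dict.mk (q :: ds)).contains r0.1 = true := by
          rw [PySem.Dict.contains_mk]; simp [hk]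
        rw [PySem.Dict.items_insert_of_contains _ _ hc]
        show List.map _ (q :: ds) = _
        simp only [List.map_cons]
        have h1 : (if (q.1 == r0.1) = true then (r0.1, r0.2) else q) = (r0.1, r0.2) := by
          simp [hk]
        rw [h1]
        have h2 : ds.map (fun p => if (p.1 == r0.1) = true then (r0.1, r0.2) else p) = ds := by
          conv_rhs => rw [← List.map_id ds]
          apply List.map_congr_left
          intro p hp
          have hne : p.1 ≠ r0.1 := by
            intro he
            exact hk_not_ds (hk ▸ he ▸ List.mem_map_of_mem hp)
          simp [hne]
        rw [h2]
      rw [hins, pv_foldl_insert_cons ds hk_not_rs, ih rs hn' hpre']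

theorem pv_update_extends (d r : PySem.Dict String Int)
    (hnr : r.keys.Nodup) (hpre : d.keys <+: r.keys) :
    PySem.Dict.update d r.items = r := by
  simp only [PySem.Dict.keys] at hnr hpre
  calc PySem.Dict.update d r.items
      = r.items.foldl (fun d p => d.insert p.1 p.2) (PySem.Dict.mk d.items) := rfl
    _ = PySem.Dict.mk r.items := pv_update_extends_aux d.items r.items hnr hpre
    _ = r := rfl

theorem pv_keys_prefix_insert (d : PySem.Dict String Int) (k : String) (v : Int) :
    d.keys <+: (d.insert k v).keys := by
  by_cases h : d.contains k
  · rw [PySem.Dict.keys_insert_of_contains (h := h)]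
  · rw [PySem.Dict.keys_insert_of_not_contains (h := by simpa using h)]
    exact ⟨[k], rfl⟩

-- the update in A's loop is a no-op: pvGoA = pvGoAc, and pvGoAc extends its accumulator
theorem pv_goA_collapse (diz : List (String × List String)) (y : Int) :
    ∀ (f : Nat) (root : String) (g : Int) (acc : PySem.Dict String Int), acc.keys.Nodup →
      pvGoA diz y f root g acc = pvGoAc diz y f root g acc
      ∧ (pvGoAc diz y f root g acc).keys.Nodup
      ∧ acc.keys <+: (pvGoAc diz y f root g acc).keys := by
  intro f
  induction f with
  | zero =>
    intro root g acc hnd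
    refine ⟨?_, ?_, ?_⟩
    · simp [pvGoA, pvGoAc]
    · simpa [pvGoAc] using hnd
    · simp [pvGoAc]
  | succ f ih =>
    intro root g acc hnd
    cases hcs : (PySem.Dict.mk diz).get? root with
    | none =>
      refine ⟨?_, ?_, ?_⟩ <;> simp [pvGoA, pvGoAc, hcs, hnd]
    | some cs =>
      have hQ : ∀ (l : List String) (gg : Int) (a : PySem.Dict String Int), a.keys.Nodup →
          (l.foldl (fun a c => PySem.Dict.update a (pvGoA diz y f c gg a).items) a
             = l.foldl (fun a c => pvGoAc diz y f c gg a) a)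
          ∧ (l.foldl (fun a c => pvGoAc diz y f c gg a) a).keys.Nodup
          ∧ a.keys <+: (l.foldl (fun a c => pvGoAc diz y f c gg a) a).keys := by
        intro l
        induction l with
        | nil => intro gg a ha; exact ⟨rfl, ha, List.prefix_refl _⟩
        | cons c l ihl =>
          intro gg a ha
          obtain ⟨he, hnR, hpR⟩ := ih c gg a ha
          simp only [List.foldl_cons]
          rw [he, pv_update_extends a _ hnR hpR]
          obtain ⟨he2, hn2, hp2⟩ := ihl gg (pvGoAc diz y f c gg a) hnR
          exact ⟨he2, hn2, hpR.trans hp2⟩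
      have hnd1 := PySem.Dict.nodup_keys_insert acc root g hnd
      obtain ⟨he, hn2, hp2⟩ := hQ cs (if (List.length cs : Int) = y then g + 1 else g) (acc.insert root g) hnd1
      refine ⟨?_, ?_, ?_⟩
      · simp only [pvGoA, pvGoAc, hcs]
        exact he
      · simp only [pvGoAc, hcs]
        exact hn2
      · simp only [pvGoAc, hcs]
        exact (pv_keys_prefix_insert acc root g).trans hp2

-- the stack machine runs A's collapsed recursion entry by entry
theorem pv_goB_eq_foldl (diz : List (String × List String)) (y : Int) :
    ∀ (st : List (String × Int × Nat)) (acc : PySem.Dict String Int),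
      pvGoB diz y st acc = st.foldl (fun a e => pvGoAc diz y e.2.2 e.1 e.2.1 a) acc := by
  intro st acc
  fun_induction pvGoB diz y st acc with
  | case1 => rfl
  | case2 node g rest acc ih =>
    simp only [List.foldl_cons]
    rw [ih]
    simp [pvGoAc]
  | case3 node g rest acc f' hg ih =>
    simp only [List.foldl_cons]
    rw [ih]
    simp [pvGoAc, hg]
  | case4 node g rest acc f' cs hg acc1 g' ih =>
    simp only [List.foldl_cons]
    rw [ih, List.foldl_append, List.foldl_map]
    simp only [pvGoAc, hg]
    rfl

-- ===== VERDICT (by name: the statement is the Claim_ definition above) =====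
theorem find_ancients_spec : Claim_equal_find_ancients := by
  intro diz diz_root root y grado _hdom hpre
  unfold Spec_find_ancients find_ancients find_ancients_alt
  have hn : (PySem.Dict.mk diz_root).keys.Nodup := by
    simpa [PySem.Dict.keys] using hpre.2.1
  rw [pv_goB_eq_foldl, (pv_goA_collapse diz y (diz.length + 1) root grado _ hn).1]
  rfl
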